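-- pv_equiv track=rewrite | github.com/iizxcv/iizxcv | backjoon/Hard_Quiz/3번문제_9935_문자열_폭발.py | explode_string
-- ===== SOURCE A (Python) =====
-- def explode_string(s, bomb):
--     stack = []
--     bomb_len = len(bomb)
--
--
--     for char in s :
--         # 스택에 쌓인 무자의 끝이 폭발 문자열과 같다면 제거
--         stack.append(char)
--         if len(stack)  >= bomb_len:
--             if ''.join(stack[-bomb_len:]) == bomb:
--                 # 폭발 길이만큼 제거
--                 for _ in range(bomb_len):
--                     stack.pop()
--
--     result = ''.join(stack)
--     return result if result else "FRULA"
-- ===== SOURCE B (Python) =====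
-- def _rescan(stack, c, bomb, q):
--     # largest k <= q such that (last k-1 stacked chars) + c == bomb[:k]
--     for k in range(q, 0, -1):
--         if bomb[k - 1] == c and [ch for ch, _ in stack[len(stack) - (k - 1):]] == list(bomb[:k - 1]):
--             return k
--     return 0
--
--
-- def explode_string(s, bomb):
--     if not bomb:
--         return s if s else "FRULA"
--     m = len(bomb)
--     stack = []  # pairs (char, length of longest stack-suffix that is a bomb-prefix)
--     for c in s:
--         q = stack[-1][1] if stack else 0
--         if bomb[q] == c:
--             q += 1
--         else:
--             q = _rescan(stack, c, bomb, q)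
--         if q == m:
--             del stack[len(stack) - (m - 1):]
--         else:
--             stack.append((c, q))
--     out = ''.join(ch for ch, _ in stack)
--     return out if out else "FRULA"
-- ===== Notes on version B (the rewrite author's own statement) =====
-- stated objective: alternative
-- what changed: Instead of joining and comparing the last len(bomb) characters of the stack on every push, B stores with each stack element a KMP-automaton match state (length of the longest stack-suffix that is a bomb-prefix, maintained incrementally with a direct rescan on mismatch) and pops when the state reaches len(bomb); it trades A's C-level slice comparison per character for per-element bookkeeping.
import Mathlib
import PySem

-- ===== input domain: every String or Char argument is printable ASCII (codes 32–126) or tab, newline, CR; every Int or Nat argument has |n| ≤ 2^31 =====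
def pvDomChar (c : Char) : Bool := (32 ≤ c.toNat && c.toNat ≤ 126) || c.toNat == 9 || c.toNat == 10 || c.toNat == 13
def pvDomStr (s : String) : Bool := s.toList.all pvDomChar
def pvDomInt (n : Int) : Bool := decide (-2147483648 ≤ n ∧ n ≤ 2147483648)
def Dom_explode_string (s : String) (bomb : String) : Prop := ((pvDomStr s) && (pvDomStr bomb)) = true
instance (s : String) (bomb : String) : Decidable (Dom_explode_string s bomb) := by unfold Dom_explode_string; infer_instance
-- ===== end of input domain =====

-- B replaces A's length-m suffix comparison on every push by a per-element prefix-match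
-- state (KMP-automaton style, with a direct rescan on mismatch); same return value.

-- ===== PORT A =====
-- one iteration of A's "for char in s" loop body; strings handled as their char lists
-- (Python's ''.join(list-of-chars) == bomb is exactly char-list equality)
def pvStepA (bl : List Char) (stack : List Char) (char : Char) : List Char :=
  let stack := stack ++ [char]                          -- stack.append(char)
  if stack.length ≥ bl.length then                      -- if len(stack) >= bomb_len:
    if PySem.List.slice stack (some (-(bl.length : Int))) none = bl then  -- ''.join(stack[-bomb_len:]) == bomb
      (List.range bl.length).foldl (fun st _ => st.dropLast) stack        -- for _ in range(bomb_len): stack.pop()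
    else stack
  else stack

def explode_string (s : String) (bomb : String) : String :=
  let bl := bomb.toList
  let stack := s.toList.foldl (pvStepA bl) []
  let result := String.ofList stack                     -- result = ''.join(stack)
  if result ≠ "" then result else "FRULA"               -- return result if result else "FRULA"

-- ===== PORT B =====
-- Source B's _rescan: largest k ≤ q with (last k-1 stacked chars) + c == bomb[:k]
-- (Python indexes stack[len-(k-1):] with k-1 ≤ q ≤ len(stack) on every call, so the
-- Nat subtraction in `drop` is exact there)
def pvRescan (stack : List (Char × Nat)) (c : Char) (bl : List Char) : Nat → Nat
  | 0 => 0
  | k + 1 =>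
    if bl[k]? = some c ∧ (stack.drop (stack.length - k)).map Prod.fst = bl.take k
    then k + 1 else pvRescan stack c bl k

-- one iteration of Source B's loop body; bomb[q] (always in range: q < m on every
-- reachable state) is ported as the in-range case of bl[q]?
def pvStepB (bl : List Char) (stack : List (Char × Nat)) (c : Char) : List (Char × Nat) :=
  let q := match stack.getLast? with | some e => e.2 | none => 0   -- stack[-1][1] if stack else 0
  let q := if bl[q]? = some c then q + 1 else pvRescan stack c bl q
  if q = bl.length then stack.take (stack.length - (bl.length - 1)) -- del stack[len(stack)-(m-1):]
  else stack ++ [(c, q)]                                            -- stack.append((c, q))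

def explode_string_alt (s : String) (bomb : String) : String :=
  let bl := bomb.toList
  if bl = [] then (if s ≠ "" then s else "FRULA")       -- if not bomb: return s if s else "FRULA"
  else
    let stack := s.toList.foldl (pvStepB bl) []
    let out := String.ofList (stack.map Prod.fst)       -- out = ''.join(ch for ch, _ in stack)
    if out ≠ "" then out else "FRULA"

-- ===== PRECONDITION & SPEC =====
def Spec_explode_string (s : String) (bomb : String) (out : String) : Prop := out = explode_string_alt s bomb
instance (s : String) (bomb : String) (out : String) : Decidable (Spec_explode_string s bomb out) := by unfold Spec_explode_string; infer_instance

-- ===== CLAIM (what is proved, stated in full; the proofs are below) =====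
def Claim_equal_explode_string : Prop := ∀ (s : String) (bomb : String), Dom_explode_string s bomb → Spec_explode_string s bomb (explode_string s bomb)

-- ===== LEMMAS AND PROOFS =====

-- pvP bl l k: the last k chars of l equal the first k chars of bomb
abbrev pvP (bl l : List Char) (k : Nat) : Prop := l.drop (l.length - k) = bl.take k

-- length of the longest suffix of l (of length ≤ bl.length) that is a prefix of bomb
def pvLbp (bl l : List Char) : Nat := Nat.findGreatest (pvP bl l) bl.length

theorem pvP_zero (bl l : List Char) : pvP bl l 0 := by simp [pvP]

theorem pvP_le_length {bl l : List Char} {k : Nat} (hk : k ≤ bl.length) (h : pvP bl l k) :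
    k ≤ l.length := by
  have := congrArg List.length h
  simp [pvP] at this
  omega

theorem pvLbp_le {bl l : List Char} : pvLbp bl l ≤ bl.length := Nat.findGreatest_le _

theorem pvP_pvLbp (bl l : List Char) : pvP bl l (pvLbp bl l) :=
  Nat.findGreatest_spec (Nat.zero_le _) (pvP_zero bl l)

theorem pvLbp_le_length {bl l : List Char} : pvLbp bl l ≤ l.length :=
  pvP_le_length pvLbp_le (pvP_pvLbp bl l)

theorem pvLbp_is_greatest {bl l : List Char} {k : Nat} (hk : k ≤ bl.length) (h : pvP bl l k) :
    k ≤ pvLbp bl l := Nat.le_findGreatest hk h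

-- decomposition of pvP at a successor, on the extended string l ++ [c]
theorem pvP_succ_iff {bl l : List Char} {c : Char} {j : Nat} (hj : j < bl.length) (hjl : j ≤ l.length) :
    pvP bl (l ++ [c]) (j + 1) ↔ (bl[j]? = some c ∧ pvP bl l j) := by
  have hdrop : (l ++ [c]).drop ((l ++ [c]).length - (j + 1)) = l.drop (l.length - j) ++ [c] := by
    rw [List.drop_append_of_le_length (by
      simp only [List.length_append, List.length_cons, List.length_nil]; omega)]
    have : (l ++ [c]).length - (j + 1) = l.length - j := by
      simp only [List.length_append, List.length_cons, List.length_nil]; omega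
    rw [this]
  have htake : bl.take (j + 1) = bl.take j ++ [bl[j]'hj] := by
    rw [List.take_succ]
    simp [List.getElem?_eq_getElem hj]
  constructor
  · intro h
    unfold pvP at h
    rw [hdrop, htake] at h
    have hlen : (l.drop (l.length - j)).length = (bl.take j).length := by
      simp; omega
    obtain ⟨h1, h2⟩ := List.append_inj h hlen
    have hc : c = bl[j]'hj := by simpa using h2
    exact ⟨by simp [List.getElem?_eq_getElem hj, hc], h1⟩
  · rintro ⟨h1, h2⟩
    unfold pvP
    rw [hdrop, htake, h2]
    have : bl[j]'hj = c := by simpa [List.getElem?_eq_getElem hj] using h1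
    rw [this]

-- any match of the extended string is at most one longer than the longest match of l
theorem pvP_ext_bound {bl l : List Char} {c : Char} {k : Nat} (hk : k ≤ bl.length)
    (h : pvP bl (l ++ [c]) k) : k ≤ pvLbp bl l + 1 := by
  cases k with
  | zero => omega
  | succ j =>
    have hjl : j ≤ l.length := by
      have := pvP_le_length hk h
      simp at this; omega
    have hj : j < bl.length := by omega
    have := (pvP_succ_iff hj hjl).1 h
    have := pvLbp_is_greatest (le_of_lt hj) this.2
    omega

-- extension on a match: the longest border grows by exactly one
theorem pvLbp_extend {bl l : List Char} {c : Char} (hc : bl[pvLbp bl l]? = some c) :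
    pvLbp bl (l ++ [c]) = pvLbp bl l + 1 := by
  set q := pvLbp bl l with hq
  have hqm : q < bl.length := by
    have := List.getElem?_eq_some_iff.1 hc
    exact this.choose
  have hql : q ≤ l.length := pvLbp_le_length
  have hP : pvP bl (l ++ [c]) (q + 1) := (pvP_succ_iff hqm hql).2 ⟨hc, pvP_pvLbp bl l⟩
  have h1 : q + 1 ≤ pvLbp bl (l ++ [c]) := pvLbp_is_greatest (by omega) hP
  have h2 : pvLbp bl (l ++ [c]) ≤ q + 1 := pvP_ext_bound pvLbp_le (pvP_pvLbp bl (l ++ [c]))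
  omega

-- on a mismatch every match of the extended string has length ≤ q
theorem pvP_mismatch_bound {bl l : List Char} {c : Char} {k : Nat}
    (hc : ¬ bl[pvLbp bl l]? = some c) (hk : k ≤ bl.length) (h : pvP bl (l ++ [c]) k) :
    k ≤ pvLbp bl l := by
  cases k with
  | zero => omega
  | succ j =>
    have hjl : j ≤ l.length := by
      have := pvP_le_length hk h
      simp at this; omega
    have hj : j < bl.length := by omega
    obtain ⟨h1, h2⟩ := (pvP_succ_iff hj hjl).1 h
    have hle : j ≤ pvLbp bl l := pvLbp_is_greatest (le_of_lt hj) h2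
    rcases Nat.lt_or_ge j (pvLbp bl l) with hlt | hge
    · omega
    · have : j = pvLbp bl l := by omega
      exact absurd (this ▸ h1) hc

-- findGreatest is unchanged when restricting below a bound that dominates all witnesses
theorem pvFindGreatest_restrict {P : Nat → Prop} [DecidablePred P] {n q : Nat}
    (hq : q ≤ n) (hbound : ∀ k ≤ n, P k → k ≤ q) (h0 : P 0) :
    Nat.findGreatest P n = Nat.findGreatest P q := by
  have hPn : P (Nat.findGreatest P n) := Nat.findGreatest_spec (Nat.zero_le _) h0
  have hPq : P (Nat.findGreatest P q) := Nat.findGreatest_spec (Nat.zero_le _) h0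
  have h1 : Nat.findGreatest P n ≤ q := hbound _ (Nat.findGreatest_le _) hPn
  have h2 : Nat.findGreatest P n ≤ Nat.findGreatest P q := Nat.le_findGreatest h1 hPn
  have h3 : Nat.findGreatest P q ≤ Nat.findGreatest P n :=
    Nat.le_findGreatest (le_trans (Nat.findGreatest_le _) hq) hPq
  omega

-- pvRescan computes findGreatest of pvP on the extended string, up to its start index
theorem pvRescan_eq {bl : List Char} {st : List (Char × Nat)} {c : Char} :
    ∀ k, k ≤ st.length →
      pvRescan st c bl k = Nat.findGreatest (pvP bl (st.map Prod.fst ++ [c])) k := by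
  intro k
  induction k with
  | zero => intro _; simp [pvRescan, Nat.findGreatest]
  | succ j ih =>
    intro hk
    have hjl : j ≤ (st.map Prod.fst).length := by simp; omega
    rw [pvRescan, Nat.findGreatest_succ]
    by_cases hj : j < bl.length
    · have hiff : (bl[j]? = some c ∧ (st.drop (st.length - j)).map Prod.fst = bl.take j)
          ↔ pvP bl (st.map Prod.fst ++ [c]) (j + 1) := by
        rw [pvP_succ_iff hj (by simpa using hjl)]
        have : (st.drop (st.length - j)).map Prod.fst
            = (st.map Prod.fst).drop ((st.map Prod.fst).length - j) := by
          simp [List.map_drop]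
        rw [this]
      by_cases h : pvP bl (st.map Prod.fst ++ [c]) (j + 1)
      · rw [if_pos (hiff.2 h), if_pos h]
      · rw [if_neg (fun hc => h (hiff.1 hc)), if_neg h]
        exact ih (by omega)
    · -- j ≥ bl.length: neither side's condition can hold
      have hno : ¬ (bl[j]? = some c ∧ (st.drop (st.length - j)).map Prod.fst = bl.take j) := by
        rintro ⟨h1, _⟩
        have := List.getElem?_eq_some_iff.1 h1
        exact absurd this.choose hj
      have hno2 : ¬ pvP bl (st.map Prod.fst ++ [c]) (j + 1) := by
        intro h
        have hlen := congrArg List.length h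
        simp [pvP] at hlen
        omega
      rw [if_neg hno, if_neg hno2]
      exact ih (by omega)

-- the invariant: every stored state is the longest-border length of its stack prefix
def pvInv (bl : List Char) (st : List (Char × Nat)) : Prop :=
  ∀ i, (hi : i < st.length) → (st[i]).2 = pvLbp bl ((st.map Prod.fst).take (i + 1))

theorem pvLbp_nil {bl : List Char} (hb : bl ≠ []) : pvLbp bl [] = 0 := by
  rw [pvLbp, Nat.findGreatest_eq_zero_iff]
  intro n hn hnb h
  have := congrArg List.length h
  simp [pvP] at this
  omega

-- the state read at the top of the stack is the longest border of the whole stack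
theorem pvTop_eq {bl : List Char} {st : List (Char × Nat)} (hb : bl ≠ []) (hinv : pvInv bl st) :
    (match st.getLast? with | some e => e.2 | none => 0) = pvLbp bl (st.map Prod.fst) := by
  cases hst : st.getLast? with
  | none =>
    have : st = [] := by simpa using hst
    subst this
    simpa using (pvLbp_nil hb).symm
  | some e =>
    have hne : st ≠ [] := by rintro rfl; simp at hst
    have hlen : 0 < st.length := List.length_pos_iff.2 hne
    have he : e = st[st.length - 1]'(by omega) := by
      rw [List.getLast?_eq_getElem?] at hst
      have := List.getElem?_eq_getElem (l := st) (i := st.length - 1) (by omega)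
      rw [this] at hst
      exact (Option.some_inj.1 hst).symm
    have := hinv (st.length - 1) (by omega)
    rw [he]
    simp only [this]
    congr 1
    have : st.length - 1 + 1 = (st.map Prod.fst).length := by simp; omega
    rw [this, List.take_length]

-- A's pop loop is a take
theorem pvPopA (n : Nat) (xs : List Char) :
    (List.range n).foldl (fun st _ => st.dropLast) xs = xs.take (xs.length - n) := by
  induction n with
  | zero => simp
  | succ k ih =>
    rw [List.range_succ, List.foldl_append, ih]
    simp only [List.foldl_cons, List.foldl_nil]
    rw [List.dropLast_eq_take]
    rw [List.take_take]
    congr 1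
    simp
    omega

-- A's pop condition is exactly "the longest border is full"
theorem pvCondA_iff {bl l' : List Char} (hb : bl ≠ []) :
    (l'.length ≥ bl.length ∧ PySem.List.slice l' (some (-(bl.length : Int))) none = bl)
      ↔ pvLbp bl l' = bl.length := by
  have hm : 0 < bl.length := List.length_pos_iff.2 hb
  rw [PySem.List.slice_from_neg_natCast l' bl.length hm]
  constructor
  · rintro ⟨h1, h2⟩
    have hP : pvP bl l' bl.length := by
      unfold pvP
      rw [h2, List.take_length]
    have := pvLbp_is_greatest (le_refl _) hP
    have := pvLbp_le (bl := bl) (l := l')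
    omega
  · intro h
    have hP : pvP bl l' bl.length := h ▸ pvP_pvLbp bl l'
    refine ⟨pvP_le_length (le_refl _) hP, ?_⟩
    unfold pvP at hP
    rw [hP, List.take_length]

-- the single-step simulation
theorem pvStep_sim {bl : List Char} (hb : bl ≠ []) {st : List (Char × Nat)} {c : Char}
    (hinv : pvInv bl st) :
    pvStepA bl (st.map Prod.fst) c = (pvStepB bl st c).map Prod.fst ∧ pvInv bl (pvStepB bl st c) := by
  set l := st.map Prod.fst with hl
  set m := bl.length with hm
  have hm1 : 0 < m := List.length_pos_iff.2 hb
  set q := (match st.getLast? with | some e => e.2 | none => 0) with hqdef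
  have hq : q = pvLbp bl l := pvTop_eq hb hinv
  have hql : q ≤ l.length := hq ▸ pvLbp_le_length
  have hqm : q ≤ m := hq ▸ pvLbp_le
  -- the new state equals the longest border of l ++ [c]
  set q2 := (if bl[q]? = some c then q + 1 else pvRescan st c bl q) with hq2def
  have hq2 : q2 = pvLbp bl (l ++ [c]) := by
    rw [hq2def]
    by_cases hc : bl[q]? = some c
    · rw [if_pos hc, hq]
      exact (pvLbp_extend (hq ▸ hc)).symm
    · rw [if_neg hc]
      rw [pvRescan_eq q (by simpa [hl] using hql)]
      rw [hq] at hc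
      have := pvFindGreatest_restrict (P := pvP bl (l ++ [c])) (n := m) (q := q)
        hqm (fun k hk hP => hq ▸ pvP_mismatch_bound hc hk hP) (pvP_zero bl (l ++ [c]))
      rw [pvLbp, ← hm, this]
  -- A's branch condition matches q2 = m
  have hcond : ((l ++ [c]).length ≥ m ∧
      PySem.List.slice (l ++ [c]) (some (-(m : Int))) none = bl) ↔ q2 = m := by
    rw [hq2]
    exact pvCondA_iff hb
  have hlenl : l.length = st.length := by simp [hl]
  constructor
  · -- the stacks' characters agree after the step
    unfold pvStepA pvStepB
    simp only [← hqdef, ← hq2def, ← hm]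
    by_cases hpop : q2 = m
    · have hc := hcond.2 hpop
      rw [if_pos hc.1, if_pos hc.2, if_pos hpop]
      rw [pvPopA]
      rw [List.map_take, ← hl]
      have ht : (l ++ [c]).length - m = l.length - (m - 1) := by simp; omega
      rw [ht, hlenl]
      rw [List.take_append_of_le_length (by omega)]
    · rw [if_neg hpop]
      have hnc : ¬ ((l ++ [c]).length ≥ m ∧
          PySem.List.slice (l ++ [c]) (some (-(m : Int))) none = bl) := fun h => hpop (hcond.1 h)
      simp only [List.map_append, List.map_cons, List.map_nil, ← hl]
      by_cases h1 : (l ++ [c]).length ≥ m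
      · rw [if_pos h1, if_neg (fun h2 => hnc ⟨h1, h2⟩)]
      · rw [if_neg h1]
  · -- the invariant is preserved
    unfold pvStepB
    simp only [← hqdef, ← hq2def, ← hm]
    by_cases hpop : q2 = m
    · rw [if_pos hpop]
      intro i hi
      have hi' : i < st.length := by
        have := List.length_take_le (st.length - (m - 1)) st
        simp at hi
        omega
      have hit : i < st.length - (m - 1) := by simp at hi; omega
      rw [List.getElem_take]
      rw [hinv i hi']
      congr 1
      rw [List.map_take, List.take_take, ← hl]
      congr 1
      omega
    · rw [if_neg hpop]
      intro i hi
      simp only [List.length_append, List.length_cons, List.length_nil] at hi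
      by_cases hilt : i < st.length
      · rw [List.getElem_append_left hilt]
        rw [hinv i hilt]
        congr 1
        simp only [List.map_append, List.map_cons, List.map_nil, ← hl]
        rw [List.take_append_of_le_length (by simp [hl]; omega)]
      · have hie : i = st.length := by simp [hl] at hi ⊢; omega
        subst hie
        have : (st ++ [(c, q2)])[st.length]'(by simp) = (c, q2) := by
          simp
        rw [this]
        simp only [List.map_append, List.map_cons, List.map_nil, ← hl]
        rw [hq2]
        congr 1
        have : st.length + 1 = (l ++ [c]).length := by simp [hl]
        rw [this, List.take_length]

-- the whole folds agree and keep the invariant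
theorem pvFold_sim {bl : List Char} (hb : bl ≠ []) :
    ∀ (cs : List Char) (st : List (Char × Nat)), pvInv bl st →
      cs.foldl (pvStepA bl) (st.map Prod.fst) = (cs.foldl (pvStepB bl) st).map Prod.fst ∧
      pvInv bl (cs.foldl (pvStepB bl) st) := by
  intro cs
  induction cs with
  | nil => intro st h; exact ⟨rfl, h⟩
  | cons c cs ih =>
    intro st h
    obtain ⟨h1, h2⟩ := pvStep_sim hb (c := c) h
    simp only [List.foldl_cons]
    rw [h1]
    exact ih _ h2

-- with an empty bomb A never pops
theorem pvFoldA_nil_bomb : ∀ (cs st : List Char), cs.foldl (pvStepA []) st = st ++ cs := by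
  intro cs
  induction cs with
  | nil => simp
  | cons c cs ih =>
    intro st
    simp only [List.foldl_cons]
    have : pvStepA [] st c = st ++ [c] := by
      unfold pvStepA
      simp [PySem.List.slice_none_none]
    rw [this, ih]
    simp

-- ===== VERDICT (by name: the statement is the Claim_ definition above) =====
theorem explode_string_spec : Claim_equal_explode_string := by
  unfold Claim_equal_explode_string Spec_explode_string
  intro s bomb _
  unfold explode_string explode_string_alt
  by_cases hb : bomb.toList = []
  · simp only [hb, if_pos rfl]
    rw [pvFoldA_nil_bomb]
    simp
  · simp only [hb, if_neg hb]
    have hinv0 : pvInv bomb.toList [] := by intro i hi; simp at hi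
    obtain ⟨h1, _⟩ := pvFold_sim hb s.toList [] hinv0
    simp only [List.map_nil] at h1
    rw [h1]
    simp
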